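-- pv_equiv track=rewrite | github.com/jamancio/plr-general-application | Tests/PAS_failure_rate.py | get_k_min
-- ===== SOURCE A (Python) =====
-- def get_k_min(anchor_sn, prime_set):
--     """Finds the k_min for a given anchor."""
--     min_distance_k = 0
--     search_dist = 1
--     while True:
--         q_lower = anchor_sn - search_dist
--         q_upper = anchor_sn + search_dist
--         if q_lower in prime_set: min_distance_k = search_dist; break
--         if q_upper in prime_set: min_distance_k = search_dist; break
--         search_dist += 1
--         if search_dist > 2000: return -1 # Failsafe
--     return min_distance_k
-- ===== SOURCE B (Python) =====
-- def get_k_min(anchor_sn, prime_set):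
--     """Finds the k_min for a given anchor."""
--     ds = [abs(p - anchor_sn) for p in prime_set if 0 < abs(p - anchor_sn) <= 2000]
--     return min(ds) if ds else -1
-- ===== Notes on version B (the rewrite author's own statement) =====
-- stated objective: simpler
-- what changed: Replaces the outward distance-by-distance membership search (up to 2000 iterations, each scanning the list twice) with a single filter-then-min pass over the primes themselves.
import Mathlib
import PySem

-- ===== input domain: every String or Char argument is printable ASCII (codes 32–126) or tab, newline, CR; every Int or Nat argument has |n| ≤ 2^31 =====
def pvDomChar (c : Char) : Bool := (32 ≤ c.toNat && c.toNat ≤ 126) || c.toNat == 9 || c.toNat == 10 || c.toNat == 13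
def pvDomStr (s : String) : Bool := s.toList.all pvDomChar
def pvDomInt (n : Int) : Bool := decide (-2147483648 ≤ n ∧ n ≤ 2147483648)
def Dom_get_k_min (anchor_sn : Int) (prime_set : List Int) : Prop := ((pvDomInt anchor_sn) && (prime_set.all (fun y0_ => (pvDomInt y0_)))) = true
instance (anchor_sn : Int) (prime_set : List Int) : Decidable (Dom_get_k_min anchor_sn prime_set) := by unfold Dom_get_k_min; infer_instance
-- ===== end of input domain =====

-- B replaces A's outward distance-by-distance search with one filter-then-min pass over the primes (objective: simpler).

-- ===== PORT A =====
-- A's while-loop: check anchor-d, then anchor+d, then increment; bail out with -1 once d exceeds 2000.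
def get_k_min_loop (anchor_sn : Int) (prime_set : List Int) (search_dist : Int) : Int :=
  if search_dist > 2000 then -1
  else if prime_set.contains (anchor_sn - search_dist) then search_dist
  else if prime_set.contains (anchor_sn + search_dist) then search_dist
  else get_k_min_loop anchor_sn prime_set (search_dist + 1)
termination_by (2001 - search_dist).toNat
decreasing_by omega

def get_k_min (anchor_sn : Int) (prime_set : List Int) : Int :=
  get_k_min_loop anchor_sn prime_set 1

-- ===== PORT B =====
def get_k_min_alt (anchor_sn : Int) (prime_set : List Int) : Int :=
  let ds := (prime_set.filter (fun p => decide (0 < |p - anchor_sn| ∧ |p - anchor_sn| ≤ 2000))).map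
              (fun p => |p - anchor_sn|)
  if ds.isEmpty then -1 else (ds.min?).getD (-1)

-- ===== PRECONDITION & SPEC =====
def Spec_get_k_min (anchor_sn : Int) (prime_set : List Int) (out : Int) : Prop := out = get_k_min_alt anchor_sn prime_set
instance (anchor_sn : Int) (prime_set : List Int) (out : Int) : Decidable (Spec_get_k_min anchor_sn prime_set out) := by unfold Spec_get_k_min; infer_instance

-- ===== CLAIM (what is proved, stated in full; the proofs are below) =====
def Claim_equal_get_k_min : Prop := ∀ (anchor_sn : Int) (prime_set : List Int), Dom_get_k_min anchor_sn prime_set → Spec_get_k_min anchor_sn prime_set (get_k_min anchor_sn prime_set)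

-- ===== LEMMAS AND PROOFS =====

-- "there is a prime at distance d from the anchor"
def Hit (a : Int) (ps : List Int) (d : Int) : Prop := (a - d) ∈ ps ∨ (a + d) ∈ ps

lemma hit_iff_mem_ds (a : Int) (ps : List Int) (m : Int) (hm : 1 ≤ m) :
    (m ∈ (ps.filter (fun p => decide (0 < |p - a| ∧ |p - a| ≤ 2000))).map (fun p => |p - a|))
      ↔ (m ≤ 2000 ∧ Hit a ps m) := by
  simp only [List.mem_map, List.mem_filter, decide_eq_true_eq, Hit]
  constructor
  · rintro ⟨p, ⟨hp, h0, h2⟩, rfl⟩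
    refine ⟨h2, ?_⟩
    rcases abs_cases (p - a) with ⟨he, _⟩ | ⟨he, _⟩
    · right; have : a + |p - a| = p := by omega
      rwa [this]
    · left; have : a - |p - a| = p := by omega
      rwa [this]
  · rintro ⟨h2, hp | hp⟩
    · exact ⟨a - m, ⟨hp, by rw [abs_of_nonpos (by omega)]; omega, by rw [abs_of_nonpos (by omega)]; omega⟩,
        by rw [abs_of_nonpos (by omega)]; omega⟩
    · exact ⟨a + m, ⟨hp, by rw [abs_of_nonneg (by omega)]; omega, by rw [abs_of_nonneg (by omega)]; omega⟩,
        by rw [abs_of_nonneg (by omega)]; omega⟩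

lemma loop_eq_neg_one (a : Int) (ps : List Int) :
    ∀ d : Int, (∀ e : Int, d ≤ e → e ≤ 2000 → ¬ Hit a ps e) → get_k_min_loop a ps d = -1 := by
  intro d
  induction d using get_k_min_loop.induct a ps with
  | case1 d h => intro _; rw [get_k_min_loop]; simp [h]
  | case2 d h hc =>
      intro hno
      exact absurd (Or.inl (by simpa using hc)) (hno d le_rfl (by omega))
  | case3 d h hc1 hc2 =>
      intro hno
      exact absurd (Or.inr (by simpa using hc2)) (hno d le_rfl (by omega))
  | case4 d h hc1 hc2 ih =>
      intro hno
      rw [get_k_min_loop]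
      simp only [h, if_false, hc1, hc2]
      exact ih (fun e he h2 => hno e (by omega) h2)

lemma loop_eq_min (a : Int) (ps : List Int) (m : Int) (hm2 : m ≤ 2000) (hhit : Hit a ps m) :
    ∀ d : Int, d ≤ m → (∀ e : Int, d ≤ e → e < m → ¬ Hit a ps e) → get_k_min_loop a ps d = m := by
  intro d
  induction d using get_k_min_loop.induct a ps with
  | case1 d h => intro hd _; omega
  | case2 d h hc =>
      intro hd hno
      rw [get_k_min_loop]
      simp only [h, if_false, hc, if_true]
      by_contra hne
      exact hno d le_rfl (by omega) (Or.inl (by simpa using hc))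
  | case3 d h hc1 hc2 =>
      intro hd hno
      rw [get_k_min_loop]
      simp only [h, if_false, hc1, if_false, hc2, if_true]
      by_contra hne
      exact hno d le_rfl (by omega) (Or.inr (by simpa using hc2))
  | case4 d h hc1 hc2 ih =>
      intro hd hno
      rw [get_k_min_loop]
      simp only [h, if_false, hc1, hc2]
      have hdm : d ≠ m := by
        intro heq; subst heq
        rcases hhit with hp | hp
        · exact hc1 (by simpa using hp)
        · exact hc2 (by simpa using hp)
      exact ih (by omega) (fun e he h2 => hno e (by omega) h2)

-- ===== VERDICT (by name: the statement is the Claim_ definition above) =====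
theorem get_k_min_spec : Claim_equal_get_k_min := by
  unfold Claim_equal_get_k_min
  intro a ps _
  unfold Spec_get_k_min get_k_min get_k_min_alt
  set ds := (ps.filter (fun p => decide (0 < |p - a| ∧ |p - a| ≤ 2000))).map (fun p => |p - a|) with hds
  by_cases hemp : ds = []
  · simp only [hemp, List.isEmpty_nil, if_true]
    apply loop_eq_neg_one
    intro e he h2 hhit
    have : e ∈ ds := (hit_iff_mem_ds a ps e he).mpr ⟨h2, hhit⟩
    simp [hemp] at this
  · have hne : ds.isEmpty = false := by simpa [List.isEmpty_iff] using hemp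
    obtain ⟨m, hm⟩ : ∃ m, ds.min? = some m := by
      cases h : ds.min? with
      | none => exact absurd (List.min?_eq_none_iff.mp h) hemp
      | some m => exact ⟨m, rfl⟩
    obtain ⟨hmem, hle⟩ := List.min?_eq_some_iff_subtype.mp hm
    simp only [hne, hm, Option.getD_some]
    have hm1 : 1 ≤ m := by
      rcases (List.mem_map.mp hmem) with ⟨p, hp, rfl⟩
      have := (List.mem_filter.mp hp).2
      simp only [decide_eq_true_eq] at this
      omega
    obtain ⟨hm2, hhit⟩ := (hit_iff_mem_ds a ps m hm1).mp hmem
    exact loop_eq_min a ps m hm2 hhit 1 hm1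
      (fun e he1 hem hhite => absurd (hle e ((hit_iff_mem_ds a ps e he1).mpr ⟨by omega, hhite⟩)) (by omega))
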